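-- pv_equiv track=rewrite | github.com/Jamesprocode/FullPageJazzOMR | jazzmus/dataset/chord_metrics.py | _windowed_match
-- ===== SOURCE A (Python) =====
-- from typing import List, Tuple, Dict, Optional, NamedTuple
--
-- def _windowed_match(pred_roots: List[str], gt_roots: List[str], window: int = 3) -> Tuple[int, set]:
--     """
--     Match GT roots to pred roots with a position tolerance window.
--
--     For each GT root at position i, look for a matching pred root
--     at positions [i-window, i+window]. Each pred root can only be
--     matched once (greedy, closest position first).
--
--     Args:
--         pred_roots: List of predicted root notes
--         gt_roots: List of ground truth root notes
--         window: Position tolerance (default ±3)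
--
--     Returns:
--         Tuple of (number of matches, set of used pred indices)
--     """
--     if not pred_roots or not gt_roots:
--         return 0, set()
--
--     used_pred_indices = set()
--     matches = 0
--
--     for gt_idx, gt_root in enumerate(gt_roots):
--         # Search window around gt position, closest first
--         search_order = []
--         for offset in range(window + 1):
--             if offset == 0:
--                 search_order.append(gt_idx)
--             else:
--                 search_order.extend([gt_idx - offset, gt_idx + offset])
--
--         # Find first matching pred root in window that hasn't been used
--         for pred_idx in search_order:
--             if pred_idx < 0 or pred_idx >= len(pred_roots):
--                 continue
--             if pred_idx in used_pred_indices: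
--                 continue
--             if pred_roots[pred_idx] == gt_root:
--                 matches += 1
--                 used_pred_indices.add(pred_idx)
--                 break
--
--     return matches, used_pred_indices
-- ===== SOURCE B (Python) =====
-- def _windowed_match(pred_roots, gt_roots, window=3):
--     # Index pred positions by root value once, then pick each GT's best
--     # candidate by the (distance, index) key instead of scanning a window list.
--     positions = {}
--     for i, root in enumerate(pred_roots):
--         positions[root] = positions.get(root, []) + [i]
--     used_pred_indices = set()
--     matches = 0
--     for gt_idx, gt_root in enumerate(gt_roots):
--         candidates = [i for i in positions.get(gt_root, [])
--                       if i not in used_pred_indices and abs(i - gt_idx) <= window]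
--         if candidates:
--             best = min(candidates, key=lambda i: (abs(i - gt_idx), i))
--             matches += 1
--             used_pred_indices.add(best)
--     return matches, used_pred_indices
-- ===== Notes on version B (the rewrite author's own statement) =====
-- stated objective: faster
-- what changed: Replaces A's per-GT construction and scan of a Theta(window)-length search-order list by a root->positions dict built once, from which each GT picks the best candidate via min under the (abs(i-gt_idx), i) key.
import Mathlib
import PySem

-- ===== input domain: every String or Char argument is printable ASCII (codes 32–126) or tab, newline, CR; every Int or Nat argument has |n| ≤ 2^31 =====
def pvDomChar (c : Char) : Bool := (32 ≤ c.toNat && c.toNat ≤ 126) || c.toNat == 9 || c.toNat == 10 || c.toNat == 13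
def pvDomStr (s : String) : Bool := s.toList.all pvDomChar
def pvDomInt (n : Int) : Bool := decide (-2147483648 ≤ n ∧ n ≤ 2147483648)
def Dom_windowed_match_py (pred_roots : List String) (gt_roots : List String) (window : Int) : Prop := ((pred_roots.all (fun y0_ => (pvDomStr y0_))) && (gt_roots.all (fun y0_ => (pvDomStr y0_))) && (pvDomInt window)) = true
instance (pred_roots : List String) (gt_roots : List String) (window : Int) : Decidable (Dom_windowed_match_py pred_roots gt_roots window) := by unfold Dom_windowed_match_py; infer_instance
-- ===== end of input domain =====

-- B replaces A's per-GT window scan by a root→positions index plus a min-by-(distance,index) pick; return values proved equal (both ports insert into the result set in the same order).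


-- ===== PORT A =====
-- inner 'for pred_idx in search_order: … break' loop: first matching index, if any
-- (pred_roots[pred_idx] is read via pyGet?, exact here since it is only read after the range check)
def pvFindA (pred_roots : List String) (used : PySem.Set Int) (gt_root : String) : List Int → Option Int
  | [] => none
  | pred_idx :: rest =>
    if pred_idx < 0 || (pred_roots.length : Int) ≤ pred_idx then pvFindA pred_roots used gt_root rest
    else if PySem.Set.contains used pred_idx then pvFindA pred_roots used gt_root rest
    else if PySem.List.pyGet? pred_roots pred_idx == some gt_root then some pred_idx
    else pvFindA pred_roots used gt_root rest

def windowed_match_py (pred_roots : List String) (gt_roots : List String) (window : Int) : Int × List Int :=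
  if pred_roots.isEmpty || gt_roots.isEmpty then (0, PySem.Set.empty)
  else
    (PySem.List.enumerate gt_roots).foldl (fun st p =>
      let gt_idx := p.1
      let gt_root := p.2
      let search_order := (PySem.List.pyRange 0 (window + 1) 1).foldl
        (fun acc offset =>
          if offset == 0 then acc ++ [gt_idx] else acc ++ [gt_idx - offset, gt_idx + offset]) []
      match pvFindA pred_roots st.2 gt_root search_order with
      | none => st
      | some i => (st.1 + 1, PySem.Set.add st.2 i))
      ((0 : Int), (PySem.Set.empty : PySem.Set Int))

-- ===== PORT B =====
-- Python's tuple comparison (abs(i - g), i) < (abs(j - g), j)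
def pvKeyLt (g i j : Int) : Bool := |i - g| < |j - g| || (|i - g| == |j - g| && i < j)

def windowed_match_py_alt (pred_roots : List String) (gt_roots : List String) (window : Int) : Int × List Int :=
  let positions : PySem.Dict String (List Int) :=
    (PySem.List.enumerate pred_roots).foldl
      (fun d p => d.insert p.2 (d.getD p.2 [] ++ [p.1])) PySem.Dict.empty
  (PySem.List.enumerate gt_roots).foldl (fun st p =>
    let gt_idx := p.1
    let cands := (positions.getD p.2 []).filter
      (fun i => !(PySem.Set.contains st.2 i) && decide (|i - gt_idx| ≤ window))
    match cands with
    | [] => st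
    | x :: xs =>
      -- min(candidates, key=lambda i: (abs(i - gt_idx), i)) ported by hand (exact: key is injective)
      let best := xs.foldl (fun b i => if pvKeyLt gt_idx i b then i else b) x
      (st.1 + 1, PySem.Set.add st.2 best))
    ((0 : Int), (PySem.Set.empty : PySem.Set Int))

-- ===== PRECONDITION & SPEC =====
def Spec_windowed_match_py (pred_roots : List String) (gt_roots : List String) (window : Int) (out : Int × List Int) : Prop := out = windowed_match_py_alt pred_roots gt_roots window
instance (pred_roots : List String) (gt_roots : List String) (window : Int) (out : Int × List Int) : Decidable (Spec_windowed_match_py pred_roots gt_roots window out) := by unfold Spec_windowed_match_py; infer_instance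

-- ===== CLAIM (what is proved, stated in full; the proofs are below) =====
def Claim_equal_windowed_match_py : Prop := ∀ (pred_roots : List String) (gt_roots : List String) (window : Int), Dom_windowed_match_py pred_roots gt_roots window → Spec_windowed_match_py pred_roots gt_roots window (windowed_match_py pred_roots gt_roots window)

-- ===== LEMMAS AND PROOFS =====

-- total-order key: pvK g i < pvK g j ↔ (|i-g|, i) <lex (|j-g|, j); injective on Int
def pvK (g i : Int) : Int := 2 * |i - g| + (if g ≤ i then 1 else 0)

theorem pvK_lt_iff (g i j : Int) : pvKeyLt g i j = true ↔ pvK g i < pvK g j := by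
  simp only [pvKeyLt, pvK, Bool.or_eq_true, Bool.and_eq_true, decide_eq_true_eq, beq_iff_eq]
  rcases abs_cases (i - g) with ⟨h1, h2⟩ | ⟨h1, h2⟩ <;>
    rcases abs_cases (j - g) with ⟨h3, h4⟩ | ⟨h3, h4⟩ <;>
    split_ifs <;> omega

theorem pvK_inj (g i j : Int) (h : pvK g i = pvK g j) : i = j := by
  simp only [pvK] at h
  rcases abs_cases (i - g) with ⟨h1, h2⟩ | ⟨h1, h2⟩ <;>
    rcases abs_cases (j - g) with ⟨h3, h4⟩ | ⟨h3, h4⟩ <;>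
    split_ifs at h <;> omega

-- A's search_order as a flatMap of distance blocks
def pvBlock (g o : Int) : List Int := if o == 0 then [g] else [g - o, g + o]

def pvSO (g w : Int) : List Int := (PySem.List.pyRange 0 (w + 1) 1).flatMap (pvBlock g)

theorem searchOrder_eq (g w : Int) :
    (PySem.List.pyRange 0 (w + 1) 1).foldl
      (fun acc offset => if offset == 0 then acc ++ [g] else acc ++ [g - offset, g + offset]) []
    = pvSO g w := by
  have hf : (fun (acc : List Int) (offset : Int) => if offset == 0 then acc ++ [g] else acc ++ [g - offset, g + offset])
      = fun acc offset => acc ++ pvBlock g offset := by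
    funext acc o; simp only [pvBlock]; split <;> rfl
  rw [hf, PySem.List.foldl_append_eq_flatMap]
  rfl

theorem mem_pvBlock (g o i : Int) (ho : 0 ≤ o) : i ∈ pvBlock g o ↔ |i - g| = o := by
  simp only [pvBlock]
  rcases abs_cases (i - g) with ⟨h1, h2⟩ | ⟨h1, h2⟩ <;>
    split <;> rename_i h <;> simp only [beq_iff_eq] at h <;>
    simp only [List.mem_cons, List.not_mem_nil, or_false] <;>
    constructor <;> intro hh <;> omega

theorem mem_pvSO (g w i : Int) : i ∈ pvSO g w ↔ |i - g| ≤ w := by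
  simp only [pvSO, List.mem_flatMap, PySem.List.mem_pyRange_one]
  constructor
  · rintro ⟨o, ⟨ho0, how⟩, hmem⟩
    rw [mem_pvBlock g o i ho0] at hmem; omega
  · intro h
    refine ⟨|i - g|, ⟨abs_nonneg _, by omega⟩, ?_⟩
    exact (mem_pvBlock g _ i (abs_nonneg _)).mpr rfl

theorem pvK_lt_of_abs_lt (g a b : Int) (h : |a - g| < |b - g|) : pvK g a < pvK g b := by
  simp only [pvK]; split_ifs <;> omega

theorem pairwise_block (g : Int) (o : Int) (ho : 0 ≤ o) :
    (pvBlock g o).Pairwise (fun a b => pvK g a < pvK g b) := by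
  simp only [pvBlock]
  split
  · simp
  · rename_i h; simp only [beq_iff_eq] at h
    refine List.pairwise_cons.2 ⟨?_, by simp⟩
    intro b hb; simp only [List.mem_cons, List.not_mem_nil, or_false] at hb; subst hb
    simp only [pvK]
    rcases abs_cases (g - o - g) with ⟨h1,h2⟩|⟨h1,h2⟩ <;>
      rcases abs_cases (g + o - g) with ⟨h3,h4⟩|⟨h3,h4⟩ <;> split_ifs <;> omega

theorem pairwise_pvSO_nat (g : Int) (n : Nat) :
    (((PySem.List.pyRange 0 (n : Int) 1).flatMap (pvBlock g)).Pairwise (fun a b => pvK g a < pvK g b)) := by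
  induction n with
  | zero => simp [PySem.List.pyRange_one_eq_nil]
  | succ n ih =>
    have hc : ((n + 1 : Nat) : Int) = (n : Int) + 1 := by push_cast; ring
    rw [hc, PySem.List.pyRange_one_succ_right (by positivity), List.flatMap_append]
    rw [List.pairwise_append]
    refine ⟨ih, by simpa using pairwise_block g n (by positivity), ?_⟩
    intro a ha b hb
    simp only [List.mem_flatMap, PySem.List.mem_pyRange_one] at ha
    obtain ⟨o, ⟨ho0, hon⟩, hao⟩ := ha
    rw [mem_pvBlock g o a ho0] at hao
    simp only [List.flatMap_singleton] at hb
    rw [mem_pvBlock g _ b (by positivity)] at hb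
    exact pvK_lt_of_abs_lt g a b (by omega)

theorem pairwise_pvSO (g w : Int) : (pvSO g w).Pairwise (fun a b => pvK g a < pvK g b) := by
  unfold pvSO
  rcases le_or_gt 0 w with hw | hw
  · have : w + 1 = (((w + 1).toNat : Nat) : Int) := by omega
    rw [this]; exact pairwise_pvSO_nat g _
  · rw [PySem.List.pyRange_one_eq_nil (by omega)]; simp

-- validity predicate of A's inner loop
def pvValid (pred : List String) (used : PySem.Set Int) (r : String) (i : Int) : Prop :=
  (0 ≤ i ∧ i < (pred.length : Int)) ∧ PySem.Set.contains used i = false ∧ PySem.List.pyGet? pred i = some r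

theorem findA_none_iff (pred : List String) (used : PySem.Set Int) (r : String) (l : List Int) :
    pvFindA pred used r l = none ↔ ∀ i ∈ l, ¬ pvValid pred used r i := by
  induction l with
  | nil => simp [pvFindA]
  | cons i rest ih =>
    simp only [pvFindA, pvValid]
    split_ifs with h1 h2 h3
    · simp only [Bool.or_eq_true, decide_eq_true_eq] at h1
      rw [ih]; simp only [List.forall_mem_cons, pvValid]
      constructor
      · intro hr; exact ⟨by intro hv; omega, hr⟩
      · exact fun h => h.2
    · rw [ih]; simp only [List.forall_mem_cons, pvValid]
      constructor
      · intro hr; exact ⟨by intro hv; rw [h2] at hv; exact absurd hv.2.1 (by simp), hr⟩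
      · exact fun h => h.2
    · simp only [beq_iff_eq] at h3
      constructor
      · intro h; cases h
      · intro h
        exfalso; apply h i (by simp)
        simp only [Bool.or_eq_true, decide_eq_true_eq, not_or] at h1
        exact ⟨by omega, by simpa using h2, h3⟩
    · simp only [beq_iff_eq] at h3
      rw [ih]; simp only [List.forall_mem_cons, pvValid]
      constructor
      · intro hr; exact ⟨by intro hv; exact h3 hv.2.2, hr⟩
      · exact fun h => h.2

theorem findA_some (pred : List String) (used : PySem.Set Int) (r : String) (g : Int) (l : List Int)
    (hpw : l.Pairwise (fun a b => pvK g a < pvK g b)) (m : Int)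
    (h : pvFindA pred used r l = some m) :
    m ∈ l ∧ pvValid pred used r m ∧ ∀ j ∈ l, pvValid pred used r j → pvK g m ≤ pvK g j := by
  induction l with
  | nil => simp [pvFindA] at h
  | cons i rest ih =>
    rw [List.pairwise_cons] at hpw
    simp only [pvFindA] at h
    split_ifs at h with h1 h2 h3
    · obtain ⟨hm, hv, hmin⟩ := ih hpw.2 h
      refine ⟨List.mem_cons_of_mem _ hm, hv, ?_⟩
      intro j hj hjv
      rcases List.mem_cons.1 hj with rfl | hj
      · exfalso; simp only [Bool.or_eq_true, decide_eq_true_eq] at h1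
        obtain ⟨⟨hj1, hj2⟩, _⟩ := hjv; omega
      · exact hmin j hj hjv
    · obtain ⟨hm, hv, hmin⟩ := ih hpw.2 h
      refine ⟨List.mem_cons_of_mem _ hm, hv, ?_⟩
      intro j hj hjv
      rcases List.mem_cons.1 hj with rfl | hj
      · have hmem : j ∈ used := (PySem.Set.contains_iff _ _).1 h2
        exact absurd hjv (by simp [pvValid, hmem])
      · exact hmin j hj hjv
    · simp only [Option.some.injEq] at h; subst h
      simp only [Bool.or_eq_true, decide_eq_true_eq, not_or] at h1
      simp only [beq_iff_eq] at h3
      refine ⟨by simp, ⟨⟨by omega, by omega⟩, by simpa using h2, h3⟩, ?_⟩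
      intro j hj hjv
      rcases List.mem_cons.1 hj with rfl | hj
      · exact le_refl _
      · exact le_of_lt (hpw.1 j hj)
    · simp only [beq_iff_eq] at h3
      obtain ⟨hm, hv, hmin⟩ := ih hpw.2 h
      refine ⟨List.mem_cons_of_mem _ hm, hv, ?_⟩
      intro j hj hjv
      rcases List.mem_cons.1 hj with rfl | hj
      · exact absurd hjv.2.2 h3
      · exact hmin j hj hjv

-- the positions dict built by B: its lookup is the filtered enumeration
theorem positions_getD (pred : List String) (s0 : Int) (d : PySem.Dict String (List Int)) (r : String) :
    ((PySem.List.enumerate pred s0).foldl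
      (fun d p => d.insert p.2 (d.getD p.2 [] ++ [p.1])) d).getD r []
    = d.getD r [] ++ ((PySem.List.enumerate pred s0).filter (fun p => p.2 == r)).map (·.1) := by
  induction pred generalizing s0 d with
  | nil => simp [PySem.List.enumerate_nil]
  | cons x xs ih =>
    rw [PySem.List.enumerate_cons]
    simp only [List.foldl_cons, List.filter_cons]
    rw [ih]
    by_cases hx : x = r
    · subst hx
      simp [PySem.Dict.getD_insert_self]
    · rw [PySem.Dict.getD_insert_of_ne (hne := fun h => hx h.symm)]
      simp [hx]

theorem mem_positions (pred : List String) (r : String) (i : Int) :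
    (i ∈ ((PySem.List.enumerate pred 0).foldl
      (fun d p => d.insert p.2 (d.getD p.2 [] ++ [p.1])) PySem.Dict.empty).getD r [])
    ↔ ((0 ≤ i ∧ i < (pred.length : Int)) ∧ PySem.List.pyGet? pred i = some r) := by
  rw [positions_getD]
  simp only [PySem.Dict.getD_empty, List.nil_append, List.mem_map, List.mem_filter,
    PySem.List.mem_enumerate_iff]
  constructor
  · rintro ⟨p, ⟨⟨k, hk, rfl⟩, hr⟩, rfl⟩
    simp only [beq_iff_eq] at hr
    simp only [zero_add]
    refine ⟨⟨by positivity, by exact_mod_cast hk⟩, ?_⟩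
    rw [PySem.List.pyGet?_natCast]
    simp [List.getElem?_eq_getElem hk, hr]
  · rintro ⟨⟨h0, hn⟩, hget⟩
    have hi : i = ((i.toNat : Nat) : Int) := by omega
    have hk : i.toNat < pred.length := by omega
    refine ⟨(i, r), ⟨⟨i.toNat, hk, ?_⟩, by simp⟩, rfl⟩
    rw [hi, PySem.List.pyGet?_natCast, List.getElem?_eq_getElem hk] at hget
    simp only [Option.some.injEq] at hget
    simp [hget, ← hi]

-- B's min-by-key fold is the first (here: unique) key-minimal element
theorem foldl_pick_spec (g : Int) (x : Int) (xs : List Int) :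
    xs.foldl (fun b i => if pvKeyLt g i b then i else b) x ∈ x :: xs ∧
    ∀ j ∈ x :: xs, pvK g (xs.foldl (fun b i => if pvKeyLt g i b then i else b) x) ≤ pvK g j := by
  induction xs generalizing x with
  | nil => simp
  | cons i rest ih =>
    simp only [List.foldl_cons]
    have hpick : (if pvKeyLt g i x then i else x) ∈ x :: [i] ∧
        pvK g (if pvKeyLt g i x then i else x) ≤ pvK g x ∧
        pvK g (if pvKeyLt g i x then i else x) ≤ pvK g i := by
      split_ifs with hk
      · exact ⟨by simp, le_of_lt ((pvK_lt_iff g i x).1 hk), le_refl _⟩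
      · refine ⟨by simp, le_refl _, ?_⟩
        by_contra hlt
        exact hk ((pvK_lt_iff g i x).2 (by omega))
    obtain ⟨hmem, hmin⟩ := ih (if pvKeyLt g i x then i else x)
    constructor
    · rcases List.mem_cons.1 hmem with heq | hmem'
      · rw [heq]; rcases List.mem_cons.1 hpick.1 with h | h
        · simp [h]
        · simp only [List.mem_cons, List.not_mem_nil, or_false] at h; simp [h]
      · simp [hmem']
    · intro j hj
      rcases List.mem_cons.1 hj with rfl | hj'
      · exact le_trans (hmin _ (by simp)) hpick.2.1
      · rcases List.mem_cons.1 hj' with rfl | hj''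
        · exact le_trans (hmin _ (by simp)) hpick.2.2
        · exact hmin j (by simp [hj''])

-- candidate-list membership
theorem mem_cands (pred : List String) (used : PySem.Set Int) (r : String) (g w i : Int) :
    i ∈ (((PySem.List.enumerate pred 0).foldl
          (fun d p => d.insert p.2 (d.getD p.2 [] ++ [p.1])) PySem.Dict.empty).getD r []).filter
          (fun i => !(PySem.Set.contains used i) && decide (|i - g| ≤ w))
    ↔ pvValid pred used r i ∧ |i - g| ≤ w := by
  rw [List.mem_filter, mem_positions]
  simp only [Bool.and_eq_true, Bool.not_eq_true', decide_eq_true_eq, pvValid]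
  tauto

-- the central per-GT-step equality: A's window scan picks exactly B's key-minimal candidate
theorem step_eq (pred : List String) (used : PySem.Set Int) (r : String) (g w : Int) :
    pvFindA pred used r (pvSO g w)
    = (match (((PySem.List.enumerate pred 0).foldl
          (fun d p => d.insert p.2 (d.getD p.2 [] ++ [p.1])) PySem.Dict.empty).getD r []).filter
          (fun i => !(PySem.Set.contains used i) && decide (|i - g| ≤ w)) with
       | [] => none
       | x :: xs => some (xs.foldl (fun b i => if pvKeyLt g i b then i else b) x)) := by
  cases hA : pvFindA pred used r (pvSO g w) with
  | none =>
    rw [findA_none_iff] at hA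
    have hc : (((PySem.List.enumerate pred 0).foldl
          (fun d p => d.insert p.2 (d.getD p.2 [] ++ [p.1])) PySem.Dict.empty).getD r []).filter
          (fun i => !(PySem.Set.contains used i) && decide (|i - g| ≤ w)) = [] := by
      rw [List.eq_nil_iff_forall_not_mem]
      intro i hi
      rw [mem_cands] at hi
      exact hA i ((mem_pvSO g w i).2 hi.2) hi.1
    rw [hc]
  | some m =>
    obtain ⟨hmso, hmv, hmin⟩ := findA_some pred used r g _ (pairwise_pvSO g w) m hA
    have hmw : |m - g| ≤ w := (mem_pvSO g w m).1 hmso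
    have hmc := (mem_cands pred used r g w m).2 ⟨hmv, hmw⟩
    cases hc : (((PySem.List.enumerate pred 0).foldl
          (fun d p => d.insert p.2 (d.getD p.2 [] ++ [p.1])) PySem.Dict.empty).getD r []).filter
          (fun i => !(PySem.Set.contains used i) && decide (|i - g| ≤ w)) with
    | nil => rw [hc] at hmc; cases hmc
    | cons x xs =>
      rw [hc] at hmc
      obtain ⟨hbmem, hbmin⟩ := foldl_pick_spec g x xs
      set best := xs.foldl (fun b i => if pvKeyLt g i b then i else b) x with hbest
      have hbc : pvValid pred used r best ∧ |best - g| ≤ w := by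
        have := hbmem; rw [← hc] at this; exact (mem_cands pred used r g w best).1 this
      have h1 : pvK g m ≤ pvK g best :=
        hmin best ((mem_pvSO g w best).2 hbc.2) hbc.1
      have h2 : pvK g best ≤ pvK g m := hbmin m hmc
      have : m = best := pvK_inj g m best (le_antisymm h1 h2)
      simp only [this]
      exact (congrArg some hbest).symm ▸ rfl

-- generic: a fold whose step fixes the state fixes the state
theorem foldl_const_state {A B : Type} (f : A → B → A) (h : ∀ a b, f a b = a) (l : List B) (a : A) :
    l.foldl f a = a := by
  induction l generalizing a with
  | nil => rfl
  | cons x xs ih => rw [List.foldl_cons, h]; exact ih a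

-- the per-element step functions of the two outer folds agree
theorem steps_eq (pred : List String) (w : Int) (st : Int × List Int) (p : Int × String) :
    (match pvFindA pred st.2 p.2 ((PySem.List.pyRange 0 (w + 1) 1).foldl
        (fun acc offset => if offset == 0 then acc ++ [p.1] else acc ++ [p.1 - offset, p.1 + offset]) []) with
     | none => st
     | some i => (st.1 + 1, PySem.Set.add st.2 i))
    = (match (((PySem.List.enumerate pred).foldl
          (fun d q => d.insert q.2 (d.getD q.2 [] ++ [q.1])) PySem.Dict.empty).getD p.2 []).filter
          (fun i => !(PySem.Set.contains st.2 i) && decide (|i - p.1| ≤ w)) with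
       | [] => st
       | x :: xs => (st.1 + 1, PySem.Set.add st.2 (xs.foldl (fun b i => if pvKeyLt p.1 i b then i else b) x))) := by
  rw [searchOrder_eq p.1 w, step_eq pred st.2 p.2 p.1 w]
  rcases hL : (((PySem.List.enumerate pred).foldl
      (fun d q => d.insert q.2 (d.getD q.2 [] ++ [q.1])) PySem.Dict.empty).getD p.2 []).filter
      (fun i => !(PySem.Set.contains st.2 i) && decide (|i - p.1| ≤ w)) with _ | ⟨x, xs⟩ <;> rw [hL]

-- the two outer folds agree
theorem folds_eq (pred : List String) (w : Int) (l : List (Int × String)) (st : Int × List Int) :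
    l.foldl (fun st p =>
      match pvFindA pred st.2 p.2 ((PySem.List.pyRange 0 (w + 1) 1).foldl
          (fun acc offset => if offset == 0 then acc ++ [p.1] else acc ++ [p.1 - offset, p.1 + offset]) []) with
      | none => st
      | some i => (st.1 + 1, PySem.Set.add st.2 i)) st
    = l.foldl (fun st p =>
      match (((PySem.List.enumerate pred).foldl
          (fun d q => d.insert q.2 (d.getD q.2 [] ++ [q.1])) PySem.Dict.empty).getD p.2 []).filter
          (fun i => !(PySem.Set.contains st.2 i) && decide (|i - p.1| ≤ w)) with
       | [] => st
       | x :: xs => (st.1 + 1, PySem.Set.add st.2 (xs.foldl (fun b i => if pvKeyLt p.1 i b then i else b) x))) st := by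
  induction l generalizing st with
  | nil => rfl
  | cons p rest ih => rw [List.foldl_cons, List.foldl_cons, steps_eq]; exact ih _

-- ===== VERDICT (by name: the statement is the Claim_ definition above) =====
theorem windowed_match_py_spec : Claim_equal_windowed_match_py := by
  intro pred gt w _
  show windowed_match_py pred gt w = windowed_match_py_alt pred gt w
  unfold windowed_match_py windowed_match_py_alt
  by_cases h : (pred.isEmpty || gt.isEmpty) = true
  · rw [if_pos h]
    rcases Bool.or_eq_true_iff.1 h with hp | hg
    · -- pred_roots = []: B's fold never finds a candidate
      rw [List.isEmpty_iff] at hp; subst hp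
      rw [foldl_const_state]
      intro st p
      have : (((PySem.List.enumerate ([] : List String)).foldl
          (fun d q => d.insert q.2 (d.getD q.2 [] ++ [q.1])) PySem.Dict.empty).getD p.2 []).filter
          (fun i => !(PySem.Set.contains st.2 i) && decide (|i - p.1| ≤ w)) = [] := by
        simp [PySem.List.enumerate_nil, PySem.Dict.getD_empty]
      show (match (((PySem.List.enumerate ([] : List String)).foldl
          (fun d q => d.insert q.2 (d.getD q.2 [] ++ [q.1])) PySem.Dict.empty).getD p.2 []).filter
          (fun i => !(PySem.Set.contains st.2 i) && decide (|i - p.1| ≤ w)) with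
        | [] => st
        | x :: xs => (st.1 + 1, PySem.Set.add st.2 (xs.foldl (fun b i => if pvKeyLt p.1 i b then i else b) x))) = st
      rw [this]
    · -- gt_roots = []: B's fold is over the empty list
      rw [List.isEmpty_iff] at hg; subst hg
      rfl
  · rw [if_neg h]
    exact folds_eq pred w (PySem.List.enumerate gt) ((0 : Int), (PySem.Set.empty : PySem.Set Int))
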